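-- pv_equiv track=rewrite | github.com/RedGhoul/AlgoCast | ColtSteele/averagePair.py | averagePair
-- ===== SOURCE A (Python) =====
-- def oppcompute(val,avg):
--     return (avg*2) - val
--
-- def averagePair(arr,taravg):
--     if len(arr) == 0:
--         return False
--
--     targetMap = {}
--     for x in arr:
--         targetMap[oppcompute(x,taravg)] = x
--
--     for x in arr:
--         if x in targetMap:
--             return True
--
--     return False
-- ===== SOURCE B (Python) =====
-- def averagePair(arr, taravg):
--     s = sorted(arr)
--     target = 2 * taravg
--     left, right = 0, len(s) - 1
--     while left <= right:
--         total = s[left] + s[right]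
--         if total == target:
--             return True
--         elif total < target:
--             left += 1
--         else:
--             right -= 1
--     return False
-- ===== Notes on version B (the rewrite author's own statement) =====
-- stated objective: alternative
-- what changed: Replaced the build-a-hash-map-then-scan approach with a sort plus two-pointer sweep over a sorted copy; '<=' keeps the self-pair case (a lone element equal to taravg) that A allows.
import Mathlib
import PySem

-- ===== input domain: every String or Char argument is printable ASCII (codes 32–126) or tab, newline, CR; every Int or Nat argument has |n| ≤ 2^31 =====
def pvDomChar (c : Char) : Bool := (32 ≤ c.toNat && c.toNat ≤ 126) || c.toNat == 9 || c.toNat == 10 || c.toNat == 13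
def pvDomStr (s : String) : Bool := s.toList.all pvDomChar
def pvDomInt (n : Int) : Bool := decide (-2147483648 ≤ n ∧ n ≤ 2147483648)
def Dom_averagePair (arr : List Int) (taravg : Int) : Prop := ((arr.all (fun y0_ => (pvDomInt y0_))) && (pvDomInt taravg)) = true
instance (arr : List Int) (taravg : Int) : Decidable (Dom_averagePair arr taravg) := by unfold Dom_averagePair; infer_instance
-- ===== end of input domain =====

-- B replaces A's hash-map-then-scan with a sort + two-pointer sweep (alternative algorithm); both are total.

-- ===== PORT A =====
def oppcompute (val : Int) (avg : Int) : Int := (avg * 2) - val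

-- second loop of A: early return True on the first x contained in the map
def apScan (d : PySem.Dict Int Int) : List Int → Bool
  | [] => false
  | x :: xs => if d.contains x then true else apScan d xs

def averagePair (arr : List Int) (taravg : Int) : Bool :=
  if arr.length = 0 then false
  else
    let targetMap := arr.foldl (fun d x => d.insert (oppcompute x taravg) x) PySem.Dict.empty
    apScan targetMap arr

-- ===== PORT B =====
-- while left <= right loop; indices stay in range whenever the loop body runs (proved below),
-- so s.getD _.toNat 0 is exactly Python's s[left] / s[right] there
def twoPtr (s : List Int) (target : Int) (left right : Int) : Bool :=
  if h : left ≤ right then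
    -- total = s[left] + s[right], inlined
    if s.getD left.toNat 0 + s.getD right.toNat 0 = target then true
    else if s.getD left.toNat 0 + s.getD right.toNat 0 < target then twoPtr s target (left + 1) right
    else twoPtr s target left (right - 1)
  else false
termination_by (right - left + 1).toNat
decreasing_by all_goals omega

def averagePair_alt (arr : List Int) (taravg : Int) : Bool :=
  let s := PySem.List.sorted arr (fun x => x) false
  twoPtr s (2 * taravg) 0 ((s.length : Int) - 1)

-- ===== PRECONDITION & SPEC =====
def Spec_averagePair (arr : List Int) (taravg : Int) (out : Bool) : Prop := out = averagePair_alt arr taravg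
instance (arr : List Int) (taravg : Int) (out : Bool) : Decidable (Spec_averagePair arr taravg out) := by unfold Spec_averagePair; infer_instance

-- ===== CLAIM (what is proved, stated in full; the proofs are below) =====
def Claim_equal_averagePair : Prop := ∀ (arr : List Int) (taravg : Int), Dom_averagePair arr taravg → Spec_averagePair arr taravg (averagePair arr taravg)

-- ===== LEMMAS AND PROOFS =====

-- the common characterisation: some (possibly equal) pair of elements sums to taravg*2
def HasPair (arr : List Int) (taravg : Int) : Prop :=
  ∃ x ∈ arr, ∃ y ∈ arr, x + y = taravg * 2

theorem apScan_eq_true_iff (d : PySem.Dict Int Int) (l : List Int) :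
    apScan d l = true ↔ ∃ x ∈ l, d.contains x = true := by
  induction l with
  | nil => simp [apScan]
  | cons x xs ih =>
    by_cases h : d.contains x = true <;> simp [apScan, h, ih]

theorem averagePair_iff (arr : List Int) (taravg : Int) :
    averagePair arr taravg = true ↔ HasPair arr taravg := by
  unfold averagePair HasPair
  by_cases hnil : arr = []
  · simp [hnil]
  · have hlen : arr.length ≠ 0 := by simpa using hnil
    simp only [hlen, if_false]
    rw [apScan_eq_true_iff]
    constructor
    · rintro ⟨x, hx, hc⟩
      rw [PySem.Dict.contains_iff_mem_keys] at hc
      rw [PySem.Dict.keys_foldl_insert_key arr (fun y => oppcompute y taravg)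
        (fun d y => y) PySem.Dict.empty] at hc
      simp only [PySem.Dict.keys_empty] at hc
      have : x ∈ arr.map (fun y => oppcompute y taravg) := by
        simpa [PySem.Set.mem_update] using hc
      rcases List.mem_map.1 this with ⟨y, hy, hxy⟩
      exact ⟨x, hx, y, hy, by simp [oppcompute] at hxy; omega⟩
    · rintro ⟨x, hx, y, hy, hsum⟩
      refine ⟨x, hx, ?_⟩
      rw [PySem.Dict.contains_iff_mem_keys]
      rw [PySem.Dict.keys_foldl_insert_key arr (fun y => oppcompute y taravg)
        (fun d y => y) PySem.Dict.empty]
      simp only [PySem.Dict.keys_empty]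
      rw [PySem.Set.mem_update]
      refine Or.inr (List.mem_map.2 ⟨y, hy, ?_⟩)
      simp [oppcompute]; omega

theorem sorted_getD_mono (s : List Int) (hs : s.Pairwise (· ≤ ·)) (a b : Nat)
    (hab : a ≤ b) (hb : b < s.length) : s.getD a 0 ≤ s.getD b 0 := by
  rcases Nat.lt_or_ge a b with h | h
  · rw [List.getD_eq_getElem s 0 (by omega), List.getD_eq_getElem s 0 hb]
    exact List.pairwise_iff_getElem.1 hs a b _ _ h
  · have : a = b := by omega
    subst this; rfl

theorem twoPtr_iff (s : List Int) (t : Int) (hs : s.Pairwise (· ≤ ·)) :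
    ∀ l r : Int, 0 ≤ l → r < (s.length : Int) →
    (twoPtr s t l r = true ↔
      ∃ i j : Nat, l ≤ (i : Int) ∧ i ≤ j ∧ (j : Int) ≤ r ∧
        s.getD i 0 + s.getD j 0 = t) := by
  intro l r
  induction l, r using twoPtr.induct s t with
  | case1 l r h heq =>
    intro hl hr
    rw [twoPtr]; simp only [dif_pos h, if_pos heq]
    constructor
    · intro _
      exact ⟨l.toNat, r.toNat, by omega, by omega, by omega, by
        have : ((l.toNat : Int)) = l := by omega
        have : ((r.toNat : Int)) = r := by omega
        simpa using heq⟩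
    · intro _; trivial
  | case2 l r h hne hlt ih =>
    intro hl hr
    rw [twoPtr]; simp only [dif_pos h, if_neg hne, if_pos hlt]
    rw [ih (by omega) hr]
    constructor
    · rintro ⟨i, j, hi, hij, hj, hsum⟩
      exact ⟨i, j, by omega, hij, hj, hsum⟩
    · rintro ⟨i, j, hi, hij, hj, hsum⟩
      refine ⟨i, j, ?_, hij, hj, hsum⟩
      by_contra hlt'
      have hieq : (i : Int) = l := by omega
      have hjr : s.getD j 0 ≤ s.getD r.toNat 0 :=
        sorted_getD_mono s hs j r.toNat (by omega) (by omega)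
      have hil : s.getD i 0 = s.getD l.toNat 0 := by congr 1; omega
      omega
  | case3 l r h hne hge ih =>
    intro hl hr
    rw [twoPtr]; simp only [dif_pos h, if_neg hne, if_neg hge]
    rw [ih hl (by omega)]
    constructor
    · rintro ⟨i, j, hi, hij, hj, hsum⟩
      exact ⟨i, j, hi, hij, by omega, hsum⟩
    · rintro ⟨i, j, hi, hij, hj, hsum⟩
      refine ⟨i, j, hi, hij, ?_, hsum⟩
      by_contra hgt'
      have hjeq : (j : Int) = r := by omega
      have hli : s.getD l.toNat 0 ≤ s.getD i 0 :=
        sorted_getD_mono s hs l.toNat i (by omega) (by omega)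
      have hjl : s.getD j 0 = s.getD r.toNat 0 := by congr 1; omega
      omega
  | case4 l r h =>
    intro hl hr
    rw [twoPtr]; simp only [dif_neg h]
    constructor
    · intro hfalse; exact absurd hfalse (by simp)
    · rintro ⟨i, j, hi, hij, hj, _⟩; omega

theorem averagePair_alt_iff (arr : List Int) (taravg : Int) :
    averagePair_alt arr taravg = true ↔ HasPair arr taravg := by
  unfold averagePair_alt HasPair
  set s := PySem.List.sorted arr (fun x => x) false with hsdef
  have hperm : s.Perm arr := PySem.List.sorted_perm arr (fun x => x) false
  have hs : s.Pairwise (· ≤ ·) := by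
    have := PySem.List.sorted_pairwise arr (fun x => x)
    simpa using this
  rw [twoPtr_iff s (2 * taravg) hs 0 ((s.length : Int) - 1) (by omega) (by omega)]
  constructor
  · rintro ⟨i, j, hi, hij, hj, hsum⟩
    have hjlen : j < s.length := by omega
    have hilen : i < s.length := by omega
    refine ⟨s.getD i 0, ?_, s.getD j 0, ?_, by omega⟩
    · exact hperm.mem_iff.1 (by rw [List.getD_eq_getElem s 0 hilen]; exact List.getElem_mem _)
    · exact hperm.mem_iff.1 (by rw [List.getD_eq_getElem s 0 hjlen]; exact List.getElem_mem _)
  · rintro ⟨x, hx, y, hy, hsum⟩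
    have hx' : x ∈ s := hperm.mem_iff.2 hx
    have hy' : y ∈ s := hperm.mem_iff.2 hy
    rcases List.mem_iff_getElem.1 hx' with ⟨a, ha, hxa⟩
    rcases List.mem_iff_getElem.1 hy' with ⟨b, hb, hyb⟩
    refine ⟨min a b, max a b, by omega, by omega, by omega, ?_⟩
    rcases Nat.le_total a b with hab | hba
    · rw [Nat.min_eq_left hab, Nat.max_eq_right hab,
        List.getD_eq_getElem s 0 ha, List.getD_eq_getElem s 0 hb, hxa, hyb]
      omega
    · rw [Nat.min_eq_right hba, Nat.max_eq_left hba,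
        List.getD_eq_getElem s 0 hb, List.getD_eq_getElem s 0 ha, hxa, hyb]
      omega

-- ===== VERDICT (by name: the statement is the Claim_ definition above) =====
theorem averagePair_spec : Claim_equal_averagePair := by
  intro arr taravg _
  unfold Spec_averagePair
  rw [Bool.eq_iff_iff, averagePair_iff, averagePair_alt_iff]
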